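-- pv_equiv track=rewrite | github.com/variablehair/190wi18 | counter_task2_dict.py | EOS_prune
-- ===== SOURCE A (Python) =====
-- END_OF_SENTENCE = ['.', '?', '!', '\n']
--
-- def EOS_prune(word_list, kept_words, position):
--     if position == len(word_list) - 1:
--         return word_list
--     elif word_list[position] in END_OF_SENTENCE:
--         return kept_words
--     else:
--         kept_words.append(word_list[position])
--         return EOS_prune(word_list, kept_words, position+1)
-- ===== SOURCE B (Python) =====
-- END_OF_SENTENCE = ['.', '?', '!', '\n']
--
-- def EOS_prune(word_list, kept_words, position):
--     if position == len(word_list) - 1: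
--         return word_list
--     for i in range(position, len(word_list) - 1):
--         if word_list[i] in END_OF_SENTENCE:
--             return kept_words
--         kept_words.append(word_list[i])
--     return word_list
-- ===== Notes on version B (the rewrite author's own statement) =====
-- stated objective: simpler
-- what changed: A recurses word by word, passing the growing kept_words and position through recursive calls; B is a single plain for-loop over range(position, len(word_list)-1), returning kept_words at the first sentence-ender and the whole list when the loop runs out.
import Mathlib
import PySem

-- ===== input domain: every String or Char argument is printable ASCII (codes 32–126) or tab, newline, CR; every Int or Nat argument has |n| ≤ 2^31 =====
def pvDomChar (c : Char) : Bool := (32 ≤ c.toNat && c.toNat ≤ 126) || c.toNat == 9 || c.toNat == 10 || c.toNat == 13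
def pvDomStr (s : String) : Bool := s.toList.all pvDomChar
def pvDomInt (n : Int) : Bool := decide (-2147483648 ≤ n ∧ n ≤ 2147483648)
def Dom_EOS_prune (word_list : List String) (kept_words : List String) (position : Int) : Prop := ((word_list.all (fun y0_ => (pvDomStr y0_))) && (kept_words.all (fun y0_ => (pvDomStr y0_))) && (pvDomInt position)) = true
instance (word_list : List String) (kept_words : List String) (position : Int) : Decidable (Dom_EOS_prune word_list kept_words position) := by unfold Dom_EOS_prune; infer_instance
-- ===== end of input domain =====

-- B replaces A's word-by-word recursion by one plain for-loop over range(position, len-1)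
-- (objective: simpler); equivalence is about the RETURN value (both append the same words
-- to kept_words on every input Pre_ admits).

def pvEOS : List String := [".", "?", "!", "\n"]

-- ===== PORT A =====
def EOS_prune (word_list : List String) (kept_words : List String) (position : Int) : List String :=
  if position = (word_list.length : Int) - 1 then word_list
  else
    match h : PySem.List.pyGet? word_list position with
    | none => []  -- IndexError in Python; excluded by Pre_
    | some w =>
      if w ∈ pvEOS then kept_words
      else EOS_prune word_list (kept_words ++ [w]) (position + 1)
termination_by ((word_list.length : Int) - position).toNat
decreasing_by
  have hr : ¬ (PySem.List.pyGet? word_list position = none) := by simp [h]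
  rw [PySem.List.pyGet?_eq_none_iff] at hr
  have : PySem.Raise.InRange word_list.length position := not_not.mp hr
  unfold PySem.Raise.InRange at this
  omega

-- ===== PORT B =====
-- the for-loop body: for each index i, return kept_words at a sentence-ender,
-- else append word_list[i]; word_list if the loop runs out
def bFor (word_list : List String) (kept_words : List String) : List Int → List String
  | [] => word_list
  | i :: rest =>
    match PySem.List.pyGet? word_list i with
    | none => []  -- IndexError in Python; excluded by Pre_
    | some w => if w ∈ pvEOS then kept_words else bFor word_list (kept_words ++ [w]) rest

def EOS_prune_alt (word_list : List String) (kept_words : List String) (position : Int) : List String :=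
  if position = (word_list.length : Int) - 1 then word_list
  else bFor word_list kept_words (PySem.List.pyRange position ((word_list.length : Int) - 1) 1)

-- ===== PRECONDITION & SPEC =====
-- Pre_ excludes exactly the inputs on which A raises IndexError (position out of range).
def Pre_EOS_prune (word_list : List String) (kept_words : List String) (position : Int) : Prop :=
  position = (word_list.length : Int) - 1 ∨
    (-(word_list.length : Int) ≤ position ∧ position < (word_list.length : Int) - 1)
instance (word_list : List String) (kept_words : List String) (position : Int) : Decidable (Pre_EOS_prune word_list kept_words position) := by unfold Pre_EOS_prune; infer_instance
def pvWitness_EOS_prune : List String × List String × Int := (["a", "b", ".", "c"], ["k"], 0)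

def Spec_EOS_prune (word_list : List String) (kept_words : List String) (position : Int) (out : List String) : Prop := out = EOS_prune_alt word_list kept_words position
instance (word_list : List String) (kept_words : List String) (position : Int) (out : List String) : Decidable (Spec_EOS_prune word_list kept_words position out) := by unfold Spec_EOS_prune; infer_instance

-- ===== CLAIM (what is proved, stated in full; the proofs are below) =====
def Claim_equal_EOS_prune : Prop := ∀ (word_list : List String) (kept_words : List String) (position : Int), Dom_EOS_prune word_list kept_words position → Pre_EOS_prune word_list kept_words position → Spec_EOS_prune word_list kept_words position (EOS_prune word_list kept_words position)

-- ===== LEMMAS AND PROOFS =====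

-- A's recursion IS the for-loop over the index range it visits: both test the very same
-- expression word_list[p] and carry the very same accumulator.
theorem EOS_prune_eq_bFor (word_list : List String) : ∀ (m : Nat) (kept_words : List String)
    (position : Int),
    -(word_list.length : Int) ≤ position → position ≤ (word_list.length : Int) - 1 →
    ((word_list.length : Int) - position).toNat ≤ m →
    EOS_prune word_list kept_words position =
      bFor word_list kept_words
        (PySem.List.pyRange position ((word_list.length : Int) - 1) 1) := by
  intro m
  induction m with
  | zero => intro kw p h1 h2 hm; omega
  | succ m ih =>
    intro kw p h1 h2 hm
    by_cases hlast : p = (word_list.length : Int) - 1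
    · subst hlast
      rw [EOS_prune, if_pos rfl,
          PySem.List.pyRange_one_eq_nil (le_refl ((word_list.length : Int) - 1))]
      rfl
    · rw [EOS_prune]
      simp only [if_neg hlast]
      rw [PySem.List.pyRange_one_cons (show p < (word_list.length : Int) - 1 by omega)]
      show _ = bFor word_list kw (p :: _)
      unfold bFor
      cases hget : PySem.List.pyGet? word_list p with
      | none =>
        exfalso
        rw [PySem.List.pyGet?_eq_none_iff] at hget
        exact hget (by unfold PySem.Raise.InRange; omega)
      | some w =>
        show (if w ∈ pvEOS then kw else EOS_prune word_list (kw ++ [w]) (p + 1)) =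
          (if w ∈ pvEOS then kw
           else bFor word_list (kw ++ [w])
             (PySem.List.pyRange (p + 1) ((word_list.length : Int) - 1) 1))
        by_cases hmem : w ∈ pvEOS
        · rw [if_pos hmem, if_pos hmem]
        · rw [if_neg hmem, if_neg hmem]
          exact ih (kw ++ [w]) (p + 1) (by omega) (by omega) (by omega)

-- ===== VERDICT (by name: the statement is the Claim_ definition above) =====
theorem EOS_prune_spec : Claim_equal_EOS_prune := by
  intro wl kw p _ hpre
  show EOS_prune wl kw p = EOS_prune_alt wl kw p
  unfold EOS_prune_alt
  rcases hpre with hlast | ⟨h1, h2⟩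
  · rw [EOS_prune, if_pos hlast, if_pos hlast]
  · rw [if_neg (show ¬ (p = (wl.length : Int) - 1) by omega)]
    exact EOS_prune_eq_bFor wl (((wl.length : Int) - p).toNat) kw p h1 (by omega) (le_refl _)
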